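-- pv_equiv track=rewrite | github.com/Jakub-Woszczek/Introduction-to-Computer-Science---AGH-Course | Zestaw 5 - recursion/KOLOSY/2020.01.16 2A.py | parzyste_o_1
-- ===== SOURCE A (Python) =====
-- def parzyste_o_1(num):
--     len = 0
--     a = num
--     while a != 0:
--         a //=10
--         len +=1
--     end_num = 0
--     for i in range(len):
--         if (num%10)%2==0:
--             end_num += (num%10+1)*(10**i)
--         else:
--             end_num += (num % 10) * (10 ** i)
--
--         num//=10
--     return end_num
-- ===== SOURCE B (Python) =====
-- def parzyste_o_1(num):
--     if num == 0:
--         return 0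
--     d = num % 10
--     adj = d + 1 if d % 2 == 0 else d
--     return adj + 10 * parzyste_o_1(num // 10)
-- ===== Notes on version B (the rewrite author's own statement) =====
-- stated objective: simpler
-- what changed: Replaces the digit-count while-loop plus a positional for-loop with 10**i weights by a single recursion that peels the low digit and reassembles via adj + 10*rec.
import Mathlib
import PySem

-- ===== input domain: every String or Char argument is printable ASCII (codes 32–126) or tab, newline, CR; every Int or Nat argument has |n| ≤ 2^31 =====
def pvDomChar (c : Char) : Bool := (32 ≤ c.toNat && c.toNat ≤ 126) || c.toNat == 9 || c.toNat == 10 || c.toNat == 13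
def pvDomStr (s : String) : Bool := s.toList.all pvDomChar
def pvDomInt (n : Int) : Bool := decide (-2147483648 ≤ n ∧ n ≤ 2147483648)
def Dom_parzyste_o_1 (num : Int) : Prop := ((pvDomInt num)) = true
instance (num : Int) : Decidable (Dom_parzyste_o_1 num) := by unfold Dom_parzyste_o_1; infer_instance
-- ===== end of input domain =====

-- B replaces A's digit-count while-loop plus positional 10**i for-loop by a one-digit-per-call
-- recursion reassembling via adj + 10*rec (objective: simpler).


-- ===== PORT A =====
-- the 'while a != 0: a //= 10; len += 1' loop; fuel only makes it total in Lean
-- (on negative input the Python loop never terminates; such inputs are outside Pre_,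
-- and 64 fuel is ample for every |num| ≤ 2^31)
def pyLenA (fuel : Nat) (a : Int) : Nat :=
  match fuel with
  | 0 => 0
  | f + 1 => if a = 0 then 0 else pyLenA f (PySem.Int.floordiv a 10) + 1

def parzyste_o_1 (num : Int) : Int :=
  let len := pyLenA 64 num
  (List.range len).foldl (fun (s : Int × Int) i =>
      let end_num :=
        if PySem.Int.mod (PySem.Int.mod s.2 10) 2 = 0 then
          s.1 + (PySem.Int.mod s.2 10 + 1) * (10 ^ i)
        else
          s.1 + (PySem.Int.mod s.2 10) * (10 ^ i)
      (end_num, PySem.Int.floordiv s.2 10)) (0, num) |>.1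

-- ===== PORT B =====
-- B's recursion; fuel only makes it total in Lean (Python B hits RecursionError on
-- negative input, which lies outside Pre_; 64 fuel is ample for every |num| ≤ 2^31)
def altGo (fuel : Nat) (num : Int) : Int :=
  match fuel with
  | 0 => 0
  | f + 1 =>
    if num = 0 then 0
    else
      let d := PySem.Int.mod num 10
      let adj := if PySem.Int.mod d 2 = 0 then d + 1 else d
      adj + 10 * altGo f (PySem.Int.floordiv num 10)

def parzyste_o_1_alt (num : Int) : Int := altGo 64 num

-- ===== PRECONDITION & SPEC =====
-- Pre_ excludes negative inputs: there A's while-loop never terminates (num // 10 of a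
-- negative number stalls at -1), so A returns on exactly the inputs with 0 ≤ num.
def Pre_parzyste_o_1 (num : Int) : Prop := 0 ≤ num
instance (num : Int) : Decidable (Pre_parzyste_o_1 num) := by unfold Pre_parzyste_o_1; infer_instance
def pvWitness_parzyste_o_1 : Int := (2480)

def Spec_parzyste_o_1 (num : Int) (out : Int) : Prop := out = parzyste_o_1_alt num
instance (num : Int) (out : Int) : Decidable (Spec_parzyste_o_1 num out) := by unfold Spec_parzyste_o_1; infer_instance

-- ===== CLAIM (what is proved, stated in full; the proofs are below) =====
def Claim_equal_parzyste_o_1 : Prop := ∀ (num : Int), Dom_parzyste_o_1 num → Pre_parzyste_o_1 num → Spec_parzyste_o_1 num (parzyste_o_1 num)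

-- ===== LEMMAS AND PROOFS =====

lemma floordiv_ten_nonneg {n : Int} (hn : 0 ≤ n) : 0 ≤ PySem.Int.floordiv n 10 := by
  rw [PySem.Int.floordiv_eq_ediv_of_pos (by norm_num)]
  exact Int.ediv_nonneg hn (by norm_num)

lemma floordiv_ten_lt_pow {n : Int} {f : Nat} (h : n < 10 ^ (f + 1)) :
    PySem.Int.floordiv n 10 < 10 ^ f := by
  rw [PySem.Int.floordiv_lt_iff_lt_mul (by norm_num)]
  calc n < 10 ^ (f + 1) := h
    _ = 10 ^ f * 10 := by ring

-- Main invariant: over indices k, k+1, ..., A's fold for exactly pyLenA fuel n steps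
-- accumulates e + 10^k times B's Horner-style recursion, for 0 ≤ n < 10^fuel.
lemma foldA_eq_altGo (fuel : Nat) :
    ∀ (n e : Int) (k : Nat), 0 ≤ n → n < 10 ^ fuel →
    (((List.range (pyLenA fuel n)).map (· + k)).foldl (fun (s : Int × Int) i =>
      let end_num :=
        if PySem.Int.mod (PySem.Int.mod s.2 10) 2 = 0 then
          s.1 + (PySem.Int.mod s.2 10 + 1) * (10 ^ i)
        else
          s.1 + (PySem.Int.mod s.2 10) * (10 ^ i)
      (end_num, PySem.Int.floordiv s.2 10)) (e, n)).1
      = e + (10 ^ k) * altGo fuel n := by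
  induction fuel with
  | zero =>
    intro n e k h0 hb
    have hn : n = 0 := by simp at hb; omega
    subst hn
    simp [pyLenA, altGo]
  | succ f ih =>
    intro n e k h0 hb
    by_cases hn : n = 0
    · subst hn; simp [pyLenA, altGo]
    · have hlen : pyLenA (f + 1) n = pyLenA f (PySem.Int.floordiv n 10) + 1 := by
        simp [pyLenA, hn]
      have hmap : (List.range (pyLenA f (PySem.Int.floordiv n 10) + 1)).map (· + k)
          = k :: (List.range (pyLenA f (PySem.Int.floordiv n 10))).map (· + (k + 1)) := by
        rw [List.range_succ_eq_map, List.map_cons, List.map_map]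
        congr 1
        · omega
        · apply List.map_congr_left
          intro a _
          simp [Function.comp]
          omega
      rw [hlen, hmap]
      simp only [List.foldl_cons]
      by_cases hd : PySem.Int.mod (PySem.Int.mod n 10) 2 = 0
      · rw [if_pos hd, ih _ _ _ (floordiv_ten_nonneg h0) (floordiv_ten_lt_pow hb)]
        simp only [altGo, if_neg hn, if_pos hd]
        ring
      · rw [if_neg hd, ih _ _ _ (floordiv_ten_nonneg h0) (floordiv_ten_lt_pow hb)]
        simp only [altGo, if_neg hn, if_neg hd]
        ring

-- ===== VERDICT (by name: the statement is the Claim_ definition above) =====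
theorem parzyste_o_1_spec : Claim_equal_parzyste_o_1 := by
  intro num hdom hpre
  unfold Spec_parzyste_o_1 parzyste_o_1 parzyste_o_1_alt
  have hb : num < 10 ^ (64 : Nat) := by
    unfold Dom_parzyste_o_1 pvDomInt at hdom
    simp only [decide_eq_true_eq] at hdom
    have : (2147483648 : Int) < 10 ^ (64 : Nat) := by norm_num
    omega
  have h := foldA_eq_altGo 64 num 0 0 hpre hb
  simpa using h
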